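-- pv_equiv track=rewrite | github.com/tajwarfahim/OOD_Detection_Inconsistency | utils/pytorch_pairwise_dataset.py | is_valid_class_to_sample_mapping
-- ===== SOURCE A (Python) =====
-- def is_valid_class_to_sample_mapping(mapping):
--     mapped_list_size = -1
--     for key in mapping:
--         mapped_list = mapping[key]
--         if mapped_list_size == -1:
--             mapped_list_size = len(mapped_list)
--         elif mapped_list_size != len(mapped_list):
--             return False
--
--     return True
-- ===== SOURCE B (Python) =====
-- def is_valid_class_to_sample_mapping(mapping):
--     lengths = {len(mapping[key]) for key in mapping}
--     return len(lengths) <= 1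
-- ===== Notes on version B (the rewrite author's own statement) =====
-- stated objective: idiomatic
-- what changed: Replaces A's running-sentinel loop with early exit by collecting the set of all mapped-list lengths and testing that it has at most one distinct element.
import Mathlib
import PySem

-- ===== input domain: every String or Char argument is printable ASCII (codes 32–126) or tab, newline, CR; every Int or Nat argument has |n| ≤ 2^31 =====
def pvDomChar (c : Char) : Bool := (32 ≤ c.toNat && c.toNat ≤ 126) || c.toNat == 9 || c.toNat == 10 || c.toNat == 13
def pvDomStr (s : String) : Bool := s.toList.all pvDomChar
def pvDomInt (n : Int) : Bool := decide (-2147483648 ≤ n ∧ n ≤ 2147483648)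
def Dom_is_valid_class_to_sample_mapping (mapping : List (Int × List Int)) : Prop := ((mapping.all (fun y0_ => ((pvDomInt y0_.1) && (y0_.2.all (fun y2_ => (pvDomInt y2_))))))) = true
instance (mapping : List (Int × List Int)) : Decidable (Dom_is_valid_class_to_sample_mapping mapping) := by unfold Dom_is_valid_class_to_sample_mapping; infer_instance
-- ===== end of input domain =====

-- B collects the set of all mapped-list lengths and checks it has at most one element,
-- instead of A's running-sentinel comparison loop (objective: idiomatic; same cost).
-- The dict argument is modelled as an association list; both ports build the PySem.Dict
-- first (duplicate keys overwrite), exactly as Python builds the dict before either runs.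

-- ===== PORT A =====
-- the 'for key in mapping' loop with the running sentinel mapped_list_size
def pvGoA (d : PySem.Dict Int (List Int)) : Int → List Int → Bool
  | _, [] => true
  | s, k :: rest =>
      let mapped_list := d.getD k []   -- mapping[key]; key comes from the dict, so present
      if s = -1 then pvGoA d (mapped_list.length : Int) rest
      else if s ≠ (mapped_list.length : Int) then false
      else pvGoA d s rest

def is_valid_class_to_sample_mapping (mapping : List (Int × List Int)) : Bool :=
  let d := PySem.Dict.ofList mapping
  pvGoA d (-1) d.keys

-- ===== PORT B =====
def is_valid_class_to_sample_mapping_alt (mapping : List (Int × List Int)) : Bool :=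
  let d := PySem.Dict.ofList mapping
  let lengths : PySem.Set Int :=
    PySem.Set.ofList (d.keys.map (fun key => ((d.getD key []).length : Int)))
  decide (PySem.Set.len lengths ≤ 1)

-- ===== PRECONDITION & SPEC =====
def Spec_is_valid_class_to_sample_mapping (mapping : List (Int × List Int)) (out : Bool) : Prop := out = is_valid_class_to_sample_mapping_alt mapping
instance (mapping : List (Int × List Int)) (out : Bool) : Decidable (Spec_is_valid_class_to_sample_mapping mapping out) := by unfold Spec_is_valid_class_to_sample_mapping; infer_instance

-- ===== CLAIM (what is proved, stated in full; the proofs are below) =====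
def Claim_equal_is_valid_class_to_sample_mapping : Prop := ∀ (mapping : List (Int × List Int)), Dom_is_valid_class_to_sample_mapping mapping → Spec_is_valid_class_to_sample_mapping mapping (is_valid_class_to_sample_mapping mapping)

-- ===== LEMMAS AND PROOFS =====

-- once the sentinel is a real (nonnegative) length, A's loop checks all remaining lengths equal it
lemma pvGoA_nonneg (d : PySem.Dict Int (List Int)) (n : ℕ) (ks : List Int) :
    pvGoA d (n : Int) ks = ks.all (fun k => decide (((d.getD k []).length : Int) = (n : Int))) := by
  induction ks with
  | nil => simp [pvGoA]
  | cons k rest ih =>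
      simp only [pvGoA, List.all_cons]
      have h1 : (n : Int) ≠ -1 := by omega
      rw [if_neg h1]
      by_cases h : (n : Int) = ((d.getD k []).length : Int)
      · rw [if_neg (by omega)]
        simp [ih, h.symm]
      · rw [if_pos (by omega)]
        simp [Ne.symm h]

-- a Nodup list containing n has at most one element iff every element is n
lemma len_le_one_iff (n : Int) (S : List Int) (hmem : n ∈ S) (hnd : S.Nodup) :
    S.length ≤ 1 ↔ ∀ m ∈ S, m = n := by
  constructor
  · intro hlen m hm
    match S, hlen with
    | [a], _ =>
        simp at hmem hm; omega
  · intro h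
    match S with
    | [] => simp
    | [a] => simp
    | a :: b :: rest =>
        exfalso
        have ha := h a (by simp)
        have hb := h b (by simp)
        simp [ha, hb] at hnd

theorem is_valid_class_to_sample_mapping_spec_aux (mapping : List (Int × List Int)) :
    is_valid_class_to_sample_mapping mapping = is_valid_class_to_sample_mapping_alt mapping := by
  unfold is_valid_class_to_sample_mapping is_valid_class_to_sample_mapping_alt
  set d := PySem.Dict.ofList mapping with hd
  simp only [PySem.Set.len]
  cases hk : d.keys with
  | nil => simp [pvGoA]
  | cons k rest =>
      have hA : pvGoA d (-1) (k :: rest)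
          = pvGoA d ((d.getD k []).length : Int) rest := by
        simp [pvGoA]
      rw [hA, pvGoA_nonneg]
      set n : Int := ((d.getD k []).length : Int) with hn
      have hmem : n ∈ PySem.Set.ofList ((k :: rest).map (fun key => ((d.getD key []).length : Int))) := by
        rw [PySem.Set.mem_ofList]
        exact List.mem_map.mpr ⟨k, by simp, rfl⟩
      rw [Bool.eq_iff_iff, decide_eq_true_iff]
      have hcast : ((List.length (PySem.Set.ofList ((k :: rest).map (fun key => ((d.getD key []).length : Int)))) : Int) ≤ 1)
          ↔ (PySem.Set.ofList ((k :: rest).map (fun key => ((d.getD key []).length : Int)))).length ≤ 1 := by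
        exact_mod_cast Iff.rfl
      rw [hcast, len_le_one_iff n _ hmem (PySem.Set.nodup_ofList _)]
      simp only [List.all_eq_true, decide_eq_true_iff]
      constructor
      · intro h m hm
        rw [PySem.Set.mem_ofList] at hm
        obtain ⟨key, hkey, rfl⟩ := List.mem_map.mp hm
        rcases List.mem_cons.mp hkey with rfl | hkey'
        · rfl
        · exact h key hkey'
      · intro h key hkey
        exact h _ (by rw [PySem.Set.mem_ofList]; exact List.mem_map.mpr ⟨key, by simp [hkey], rfl⟩)

-- ===== VERDICT (by name: the statement is the Claim_ definition above) =====
theorem is_valid_class_to_sample_mapping_spec : Claim_equal_is_valid_class_to_sample_mapping := by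
  intro mapping _
  exact is_valid_class_to_sample_mapping_spec_aux mapping
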